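-- pv_equiv track=rewrite | github.com/ujeong1/CSE310_Recitations | recitation4/distance.py | distR
-- ===== SOURCE A (Python) =====
-- import math
--
-- def distR(A, B, left, right):
--     range = right - left
--     # Division
--     if (range > 1):
--         middle = math.floor((left + right) / 2)
--         return distR(A, B, left, middle) + distR(A, B, middle, right)
--
--     # Base_case
--     else:
--         if ((A[left] != B[left]) and (A[left + 1] != B[left + 1])):
--             return 1
--         else:
--             return 0
-- ===== SOURCE B (Python) =====
-- def distR(A, B, left, right):
--     total = 0
--     # the recursion's leaves are exactly left..right-1 (one leaf at left when the
--     # interval is degenerate), each checked at i and i+1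
--     for i in range(left, max(left + 1, right)):
--         if A[i] != B[i] and A[i + 1] != B[i + 1]:
--             total += 1
--     return total
-- ===== Notes on version B (the rewrite author's own statement) =====
-- stated objective: simpler
-- what changed: Replaces the divide-and-conquer recursion by a single iterative pass that counts, over range(left, max(left+1, right)), the positions where both A[i]!=B[i] and A[i+1]!=B[i+1].
import Mathlib
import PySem

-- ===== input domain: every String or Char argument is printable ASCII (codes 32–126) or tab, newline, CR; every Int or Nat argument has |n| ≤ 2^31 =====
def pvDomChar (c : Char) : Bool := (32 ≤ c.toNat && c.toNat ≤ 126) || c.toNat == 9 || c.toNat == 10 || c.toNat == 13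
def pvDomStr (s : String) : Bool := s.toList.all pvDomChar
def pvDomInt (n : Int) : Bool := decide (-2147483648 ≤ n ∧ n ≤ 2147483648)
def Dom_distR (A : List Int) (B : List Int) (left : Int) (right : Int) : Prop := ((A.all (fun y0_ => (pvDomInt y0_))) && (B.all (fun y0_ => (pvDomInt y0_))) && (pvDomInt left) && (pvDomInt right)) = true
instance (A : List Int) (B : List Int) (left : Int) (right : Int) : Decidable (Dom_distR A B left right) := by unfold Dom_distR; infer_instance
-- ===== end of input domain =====

-- B replaces A's divide-and-conquer recursion by one iterative counting pass over the
-- leaf positions; objective: simpler (same O(n) time, no recursion stack).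

-- ===== PORT A =====
-- base-case check of A: A[left] != B[left] and A[left+1] != B[left+1], with Python's
-- short-circuit 'and'; the fallback branches are where Python raises IndexError (outside Pre_)
def pvChkA (A : List Int) (B : List Int) (i : Int) : Int :=
  match PySem.List.pyGet? A i, PySem.List.pyGet? B i with
  | some a, some b =>
    if a ≠ b then
      match PySem.List.pyGet? A (i + 1), PySem.List.pyGet? B (i + 1) with
      | some a', some b' => if a' ≠ b' then 1 else 0
      | _, _ => 0  -- IndexError in Python; excluded by Pre_distR
    else 0
  | _, _ => 0      -- IndexError in Python; excluded by Pre_distR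

-- midpoint bounds, needed for termination of the port
theorem pvMidBounds (left right : Int) (h : right - left > 1) :
    left + 1 ≤ PySem.Int.floordiv (left + right) 2 ∧
    PySem.Int.floordiv (left + right) 2 ≤ right - 1 := by
  constructor
  · rw [PySem.Int.le_floordiv_iff_mul_le (by omega)]; omega
  · have := (PySem.Int.floordiv_lt_iff_lt_mul (a := left + right) (b := 2) (q := right) (by omega)).mpr (by omega)
    omega

-- math.floor((left+right)/2) equals (left+right)//2 exactly on Dom (|left+right| ≤ 2^32 < 2^53)
def distR (A : List Int) (B : List Int) (left : Int) (right : Int) : Int :=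
  let rng := right - left
  if h : rng > 1 then
    let middle := PySem.Int.floordiv (left + right) 2
    distR A B left middle + distR A B middle right
  else
    pvChkA A B left
termination_by (right - left).toNat
decreasing_by
  · have := pvMidBounds left right h; omega
  · have := pvMidBounds left right h; omega

-- ===== PORT B =====
def pvChkB (A : List Int) (B : List Int) (i : Int) : Bool :=
  decide (PySem.List.pyGet? A i ≠ PySem.List.pyGet? B i) &&
  decide (PySem.List.pyGet? A (i + 1) ≠ PySem.List.pyGet? B (i + 1))

def distR_alt (A : List Int) (B : List Int) (left : Int) (right : Int) : Int :=
  (PySem.List.pyRange left (max (left + 1) right) 1).foldl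
    (fun total i => if pvChkB A B i then total + 1 else total) 0

-- ===== PRECONDITION & SPEC =====
-- Pre_ excludes exactly the inputs on which A raises IndexError: some visited position i
-- (or, after an observed mismatch at i, position i+1) is out of range for A or B.  The
-- leading length bounds are equivalent to in-range-ness of every visited position (the visited
-- range [left, max(left+1,right)) is never empty); they are stated first so the condition
-- evaluates without materializing a huge range when left/right are far apart.
def pvPreB (A : List Int) (B : List Int) (left : Int) (right : Int) : Bool :=
  let M := max (left + 1) right
  if -(A.length : Int) ≤ left ∧ M ≤ (A.length : Int) ∧ -(B.length : Int) ≤ left ∧ M ≤ (B.length : Int) then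
    (PySem.List.pyRange left M 1).all (fun i =>
      (PySem.List.pyGet? A i).isSome && (PySem.List.pyGet? B i).isSome &&
      (if PySem.List.pyGet? A i ≠ PySem.List.pyGet? B i then
        (PySem.List.pyGet? A (i + 1)).isSome && (PySem.List.pyGet? B (i + 1)).isSome
      else true))
  else false

def Pre_distR (A : List Int) (B : List Int) (left : Int) (right : Int) : Prop :=
  pvPreB A B left right = true
instance (A : List Int) (B : List Int) (left : Int) (right : Int) : Decidable (Pre_distR A B left right) := by unfold Pre_distR; infer_instance

def pvWitness_distR : List Int × List Int × Int × Int := ([1, 2, 3, 4], [1, 0, 0, 4], 0, 3)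

def Spec_distR (A : List Int) (B : List Int) (left : Int) (right : Int) (out : Int) : Prop := out = distR_alt A B left right
instance (A : List Int) (B : List Int) (left : Int) (right : Int) (out : Int) : Decidable (Spec_distR A B left right out) := by unfold Spec_distR; infer_instance

-- ===== CLAIM (what is proved, stated in full; the proofs are below) =====
def Claim_equal_distR : Prop := ∀ (A : List Int) (B : List Int) (left : Int) (right : Int), Dom_distR A B left right → Pre_distR A B left right → Spec_distR A B left right (distR A B left right)

-- ===== LEMMAS AND PROOFS =====

-- Pre_ gives the pointwise guarantee at every visited position
theorem pvPre_forall (A B : List Int) (left right : Int) (h : Pre_distR A B left right) :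
    ∀ i ∈ PySem.List.pyRange left (max (left + 1) right) 1,
      (PySem.List.pyGet? A i).isSome ∧ (PySem.List.pyGet? B i).isSome ∧
      (PySem.List.pyGet? A i ≠ PySem.List.pyGet? B i →
        (PySem.List.pyGet? A (i + 1)).isSome ∧ (PySem.List.pyGet? B (i + 1)).isSome) := by
  intro i hi
  unfold Pre_distR pvPreB at h
  simp only at h
  split at h
  · have hall := List.all_eq_true.mp h i hi
    by_cases hm : PySem.List.pyGet? A i ≠ PySem.List.pyGet? B i
    · rw [if_pos hm] at hall
      simp only [Bool.and_eq_true] at hall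
      exact ⟨hall.1.1, hall.1.2, fun _ => ⟨hall.2.1, hall.2.2⟩⟩
    · rw [if_neg hm] at hall
      simp only [Bool.and_true, Bool.and_eq_true] at hall
      exact ⟨hall.1, hall.2, fun c => absurd c hm⟩
  · exact absurd h (by simp)

-- the two per-position checks agree wherever Pre_ holds at that position
theorem pvChk_agree (A B : List Int) (i : Int)
    (h1 : (PySem.List.pyGet? A i).isSome) (h2 : (PySem.List.pyGet? B i).isSome)
    (h3 : PySem.List.pyGet? A i ≠ PySem.List.pyGet? B i →
      (PySem.List.pyGet? A (i + 1)).isSome ∧ (PySem.List.pyGet? B (i + 1)).isSome) :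
    pvChkA A B i = if pvChkB A B i then 1 else 0 := by
  obtain ⟨a, ha⟩ := Option.isSome_iff_exists.mp h1
  obtain ⟨b, hb⟩ := Option.isSome_iff_exists.mp h2
  unfold pvChkA pvChkB
  rw [ha, hb]
  by_cases hab : a = b
  · simp [hab]
  · have hne : PySem.List.pyGet? A i ≠ PySem.List.pyGet? B i := by rw [ha, hb]; simp [hab]
    obtain ⟨h4, h5⟩ := h3 hne
    obtain ⟨a', ha'⟩ := Option.isSome_iff_exists.mp h4
    obtain ⟨b', hb'⟩ := Option.isSome_iff_exists.mp h5
    rw [ha', hb']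
    by_cases h' : a' = b' <;> simp [hab, h']

theorem pvFoldl_shift (A B : List Int) (l : List Int) (c : Int) :
    l.foldl (fun total i => if pvChkB A B i then total + 1 else total) c
      = c + l.foldl (fun total i => if pvChkB A B i then total + 1 else total) 0 := by
  induction l generalizing c with
  | nil => simp
  | cons x xs ih =>
    simp only [List.foldl_cons]
    rw [ih, ih (if pvChkB A B x then 0 + 1 else 0)]
    by_cases h : pvChkB A B x <;> simp [h] <;> ring

theorem pvRange_split (a m b : Int) (h1 : a ≤ m) (h2 : m ≤ b) :
    PySem.List.pyRange a b 1 = PySem.List.pyRange a m 1 ++ PySem.List.pyRange m b 1 := by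
  generalize hk : (m - a).toNat = k
  induction k generalizing a with
  | zero =>
    have : m = a := by omega
    subst this
    rw [PySem.List.pyRange_one_eq_nil (le_refl m)]
    simp
  | succ k ih =>
    have ham : a < m := by omega
    rw [PySem.List.pyRange_one_cons (by omega : a < b), PySem.List.pyRange_one_cons ham]
    simp only [List.cons_append]
    congr 1
    apply ih <;> omega

-- main invariant: under Pre_, A's recursion equals B's single pass
theorem pvMain (A B : List Int) : ∀ n (left right : Int), (right - left).toNat = n →
    (∀ i ∈ PySem.List.pyRange left (max (left + 1) right) 1,
      (PySem.List.pyGet? A i).isSome ∧ (PySem.List.pyGet? B i).isSome ∧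
      (PySem.List.pyGet? A i ≠ PySem.List.pyGet? B i →
        (PySem.List.pyGet? A (i + 1)).isSome ∧ (PySem.List.pyGet? B (i + 1)).isSome)) →
    distR A B left right = distR_alt A B left right := by
  intro n
  induction n using Nat.strong_induction_on with
  | _ n ih =>
    intro left right hn hpre
    by_cases h : right - left > 1
    · -- divide step
      have hmid := pvMidBounds left right h
      set middle := PySem.Int.floordiv (left + right) 2 with hm
      have hmax : max (left + 1) right = right := by omega
      have hmax1 : max (left + 1) middle = middle := by omega
      have hmax2 : max (middle + 1) right = right := by omega
      have hsplit : PySem.List.pyRange left right 1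
          = PySem.List.pyRange left middle 1 ++ PySem.List.pyRange middle right 1 :=
        pvRange_split left middle right (by omega) (by omega)
      have hpre1 : ∀ i ∈ PySem.List.pyRange left (max (left + 1) middle) 1,
          (PySem.List.pyGet? A i).isSome ∧ (PySem.List.pyGet? B i).isSome ∧
          (PySem.List.pyGet? A i ≠ PySem.List.pyGet? B i →
            (PySem.List.pyGet? A (i + 1)).isSome ∧ (PySem.List.pyGet? B (i + 1)).isSome) := by
        intro i hi
        apply hpre
        rw [hmax, hsplit]
        rw [hmax1] at hi
        exact List.mem_append_left _ hi
      have hpre2 : ∀ i ∈ PySem.List.pyRange middle (max (middle + 1) right) 1,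
          (PySem.List.pyGet? A i).isSome ∧ (PySem.List.pyGet? B i).isSome ∧
          (PySem.List.pyGet? A i ≠ PySem.List.pyGet? B i →
            (PySem.List.pyGet? A (i + 1)).isSome ∧ (PySem.List.pyGet? B (i + 1)).isSome) := by
        intro i hi
        apply hpre
        rw [hmax, hsplit]
        rw [hmax2] at hi
        exact List.mem_append_right _ hi
      have e1 := ih (middle - left).toNat (by omega) left middle rfl hpre1
      have e2 := ih (right - middle).toNat (by omega) middle right rfl hpre2
      rw [distR]
      simp only []
      rw [dif_pos h, ← hm, e1, e2]
      unfold distR_alt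
      rw [hmax, hmax1, hmax2, hsplit, List.foldl_append]
      conv_rhs => rw [pvFoldl_shift A B]
    · -- base case: one leaf at position left
      have hmax : max (left + 1) right = left + 1 := by omega
      rw [distR]
      simp only []
      rw [dif_neg h]
      unfold distR_alt
      rw [hmax, PySem.List.pyRange_one_singleton]
      have hp := hpre left (by rw [hmax, PySem.List.pyRange_one_singleton]; simp)
      simp only [List.foldl_cons, List.foldl_nil]
      rw [pvChk_agree A B left hp.1 hp.2.1 hp.2.2]
      by_cases hc : pvChkB A B left <;> simp [hc]

-- ===== VERDICT (by name: the statement is the Claim_ definition above) =====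
theorem distR_spec : Claim_equal_distR := by
  intro A B left right _ hpre
  exact pvMain A B (right - left).toNat left right rfl (pvPre_forall A B left right hpre)
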